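-- pv_equiv track=rewrite | github.com/Nozh33/NicolasArancibia_PGY1121_003D_Transversal | Funciones.py | verificarAsiento
-- ===== SOURCE A (Python) =====
-- def verificarAsiento(arreglo_asistente, num_asiento):
--     x = 1
--     for f in range(10):
--         for c in range(10):
--             if x == num_asiento:
--                 if arreglo_asistente[f][c] == 'XXX':
--                     return False
--             x = x + 1
--     return True
-- ===== SOURCE B (Python) =====
-- def verificarAsiento(arreglo_asistente, num_asiento):
--     if not (1 <= num_asiento <= 100):
--         return True
--     f, c = divmod(num_asiento - 1, 10)
--     return arreglo_asistente[f][c] != 'XXX'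
-- ===== Notes on version B (the rewrite author's own statement) =====
-- stated objective: simpler
-- what changed: Replaced the 10x10 double loop with a running seat counter by direct arithmetic: f,c = divmod(num_asiento-1,10) after a range guard, one indexing and no loop.
import Mathlib
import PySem

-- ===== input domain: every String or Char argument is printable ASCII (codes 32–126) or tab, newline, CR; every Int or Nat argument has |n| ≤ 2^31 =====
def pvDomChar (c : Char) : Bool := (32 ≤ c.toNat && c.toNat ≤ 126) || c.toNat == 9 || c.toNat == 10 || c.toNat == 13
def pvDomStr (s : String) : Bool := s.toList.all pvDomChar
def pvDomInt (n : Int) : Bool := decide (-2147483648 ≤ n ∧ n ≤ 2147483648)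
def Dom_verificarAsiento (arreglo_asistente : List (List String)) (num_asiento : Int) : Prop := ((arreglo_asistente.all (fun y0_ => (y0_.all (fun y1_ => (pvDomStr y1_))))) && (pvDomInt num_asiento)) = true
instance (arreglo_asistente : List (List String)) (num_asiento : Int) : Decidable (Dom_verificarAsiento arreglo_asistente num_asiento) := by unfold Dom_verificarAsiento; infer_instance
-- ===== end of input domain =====

-- B replaces A's 10x10 counting double loop by direct arithmetic (divmod) — simpler, no loop.

-- ===== PORT A =====
-- arreglo_asistente[f][c]; on an out-of-range access Python raises IndexError (excluded by Pre_);
-- the port returns "" there, a value the admitted inputs never reach.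
def vaCell (g : List (List String)) (f c : Int) : String :=
  (((PySem.List.pyGet? g f).bind (fun r => PySem.List.pyGet? r c)).getD "")

-- inner 'for c in range(10)' loop: returns (early-return value if any, updated x)
def vaInner (g : List (List String)) (n : Int) (f : Int) : List Int → Int → Option Bool × Int
  | [], x => (none, x)
  | c :: cs, x =>
    if x = n then
      if vaCell g f c = "XXX" then (some false, x)
      else vaInner g n f cs (x + 1)
    else vaInner g n f cs (x + 1)

-- outer 'for f in range(10)' loop
def vaOuter (g : List (List String)) (n : Int) : List Int → Int → Option Bool
  | [], _ => none
  | f :: fs, x =>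
    match vaInner g n f (PySem.List.pyRange 0 10 1) x with
    | (some b, _) => some b
    | (none, x') => vaOuter g n fs x'

def verificarAsiento (arreglo_asistente : List (List String)) (num_asiento : Int) : Bool :=
  (vaOuter arreglo_asistente num_asiento (PySem.List.pyRange 0 10 1) 1).getD true

-- ===== PORT B =====
def verificarAsiento_alt (arreglo_asistente : List (List String)) (num_asiento : Int) : Bool :=
  if 1 ≤ num_asiento ∧ num_asiento ≤ 100 then
    match (PySem.List.pyGet? arreglo_asistente (PySem.Int.floordiv (num_asiento - 1) 10)).bind
            (fun r => PySem.List.pyGet? r (PySem.Int.mod (num_asiento - 1) 10)) with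
    | some s => decide (s ≠ "XXX")
    | none => true   -- Python raises IndexError here; excluded by Pre_
  else true

-- ===== PRECONDITION & SPEC =====
-- Pre_ excludes exactly the inputs where Python A raises IndexError: 1 ≤ n ≤ 100 but seat (n-1)//10,(n-1)%10 missing from the grid.
def Pre_verificarAsiento (arreglo_asistente : List (List String)) (num_asiento : Int) : Prop :=
  (1 ≤ num_asiento ∧ num_asiento ≤ 100) →
    (((PySem.List.pyGet? arreglo_asistente (PySem.Int.floordiv (num_asiento - 1) 10)).bind
        (fun r => PySem.List.pyGet? r (PySem.Int.mod (num_asiento - 1) 10))).isSome = true)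
instance (arreglo_asistente : List (List String)) (num_asiento : Int) : Decidable (Pre_verificarAsiento arreglo_asistente num_asiento) := by unfold Pre_verificarAsiento; infer_instance

def pvWitness_verificarAsiento : List (List String) × Int := ([["XXX", "A01"]], 2)

def Spec_verificarAsiento (arreglo_asistente : List (List String)) (num_asiento : Int) (out : Bool) : Prop := out = verificarAsiento_alt arreglo_asistente num_asiento
instance (arreglo_asistente : List (List String)) (num_asiento : Int) (out : Bool) : Decidable (Spec_verificarAsiento arreglo_asistente num_asiento out) := by unfold Spec_verificarAsiento; infer_instance

-- ===== CLAIM (what is proved, stated in full; the proofs are below) =====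
def Claim_equal_verificarAsiento : Prop := ∀ (arreglo_asistente : List (List String)) (num_asiento : Int), Dom_verificarAsiento arreglo_asistente num_asiento → Pre_verificarAsiento arreglo_asistente num_asiento → Spec_verificarAsiento arreglo_asistente num_asiento (verificarAsiento arreglo_asistente num_asiento)

-- ===== LEMMAS AND PROOFS =====

-- inner loop when n is never hit
theorem vaInner_miss (g : List (List String)) (n f : Int) (cs : List Int) (x : Int)
    (h : n < x ∨ x + cs.length ≤ n) :
    vaInner g n f cs x = (none, x + cs.length) := by
  induction cs generalizing x with
  | nil => simp [vaInner]
  | cons c cs ih =>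
    have hx : ¬ x = n := by simp only [List.length_cons] at h; omega
    rw [vaInner, if_neg hx, ih (x + 1) (by simp only [List.length_cons] at h ⊢; omega)]
    simp only [List.length_cons, Prod.mk.injEq, true_and]
    push_cast; ring

-- inner loop when n is hit at offset (n - x)
theorem vaInner_hit (g : List (List String)) (n f : Int) (cs : List Int) (x : Int)
    (h1 : x ≤ n) (h2 : n < x + cs.length) :
    vaInner g n f cs x =
      (if vaCell g f (cs.getD (n - x).toNat 0) = "XXX" then (some false, n)
       else (none, x + cs.length)) := by
  induction cs generalizing x with
  | nil => simp at h2; omega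
  | cons c cs ih =>
    rw [vaInner]
    by_cases hx : x = n
    · have h0 : (n - x).toNat = 0 := by omega
      rw [if_pos hx, h0, List.getD_cons_zero]
      by_cases hc : vaCell g f c = "XXX"
      · rw [if_pos hc, if_pos hc, hx]
      · rw [if_neg hc, if_neg hc,
            vaInner_miss g n f cs (x + 1) (by left; omega)]
        simp only [List.length_cons, Prod.mk.injEq, true_and]
        push_cast; ring
    · have h2' : n < x + 1 + cs.length := by
        simp only [List.length_cons] at h2; push_cast at h2 ⊢; omega
      rw [if_neg hx, ih (x + 1) (by omega) h2']
      have hs : (n - x).toNat = (n - (x + 1)).toNat + 1 := by omega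
      rw [hs, List.getD_cons_succ]
      by_cases hc : vaCell g f (cs.getD (n - (x + 1)).toNat 0) = "XXX"
      · rw [if_pos hc, if_pos hc]
      · rw [if_neg hc, if_neg hc]
        simp only [List.length_cons, Prod.mk.injEq, true_and]
        push_cast; ring

-- the concrete inner range
theorem pyRange10 : PySem.List.pyRange 0 10 1 = [0,1,2,3,4,5,6,7,8,9] := by decide

-- outer loop characterization
theorem vaOuter_spec (g : List (List String)) (n : Int) (fs : List Int) (x : Int) :
    vaOuter g n fs x =
      (if h : x ≤ n ∧ n < x + 10 * fs.length ∧
              vaCell g (fs.getD ((n - x).toNat / 10) 0) ((((n - x).toNat % 10 : Nat)) : Int) = "XXX"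
       then some false else none) := by
  induction fs generalizing x with
  | nil =>
    rw [vaOuter, dif_neg]
    simp only [List.length_nil]
    omega
  | cons f fs ih =>
    rw [vaOuter, pyRange10]
    by_cases hlo : x ≤ n
    · by_cases hhi : n < x + 10
      · -- hit in this row
        have hub : (n - x).toNat < 10 := by omega
        have hr : vaInner g n f [0,1,2,3,4,5,6,7,8,9] x =
            (if vaCell g f (([0,1,2,3,4,5,6,7,8,9] : List Int).getD (n - x).toNat 0) = "XXX"
             then (some false, n) else (none, x + 10)) := by
          have := vaInner_hit g n f [0,1,2,3,4,5,6,7,8,9] x hlo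
            (by simp only [List.length_cons, List.length_nil]; push_cast; omega)
          simpa using this
        have hdiv : (n - x).toNat / 10 = 0 := by omega
        have hmod : (n - x).toNat % 10 = (n - x).toNat := by omega
        have hget : (([0,1,2,3,4,5,6,7,8,9] : List Int).getD (n - x).toNat 0) = ((n - x).toNat : Int) := by
          interval_cases h : (n - x).toNat <;> simp
        rw [hr, hget]
        by_cases hc : vaCell g f ((n - x).toNat : Int) = "XXX"
        · rw [if_pos hc, dif_pos]
          refine ⟨hlo, by simp only [List.length_cons, List.length_nil]; push_cast; omega, ?_⟩
          rw [hdiv, hmod, List.getD_cons_zero]; exact hc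
        · rw [if_neg hc]
          show vaOuter g n fs (x + 10) = _
          rw [ih (x + 10),
              dif_neg (by push_cast; omega), dif_neg]
          intro ⟨_, _, hc'⟩
          rw [hdiv, hmod, List.getD_cons_zero] at hc'
          exact hc hc'
      · -- n beyond this row
        rw [vaInner_miss g n f [0,1,2,3,4,5,6,7,8,9] x
              (by right; simp only [List.length_cons, List.length_nil]; push_cast; omega)]
        show vaOuter g n fs (x + 10) = _
        rw [ih (x + 10)]
        have hd : (n - x).toNat / 10 = (n - (x + 10)).toNat / 10 + 1 := by omega
        have hm : (n - x).toNat % 10 = (n - (x + 10)).toNat % 10 := by omega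
        by_cases hcond : x + 10 ≤ n ∧ n < x + 10 + 10 * (fs.length : Int) ∧
            vaCell g (fs.getD ((n - (x + 10)).toNat / 10) 0) ((((n - (x + 10)).toNat % 10 : Nat)) : Int) = "XXX"
        · rw [dif_pos hcond, dif_pos]
          refine ⟨hlo, by simp only [List.length_cons]; push_cast; omega, ?_⟩
          rw [hd, hm, List.getD_cons_succ]; exact hcond.2.2
        · rw [dif_neg hcond, dif_neg]
          intro ⟨_, hb2, h3⟩
          apply hcond
          refine ⟨by omega, by simp only [List.length_cons] at hb2; push_cast at hb2 ⊢; omega, ?_⟩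
          rw [hd, hm, List.getD_cons_succ] at h3; exact h3
    · -- n below x everywhere
      rw [vaInner_miss g n f [0,1,2,3,4,5,6,7,8,9] x (by left; omega)]
      show vaOuter g n fs (x + 10) = _
      rw [ih (x + 10), dif_neg (by omega), dif_neg (by intro h; exact hlo h.1)]

-- ===== VERDICT (by name: the statement is the Claim_ definition above) =====
theorem verificarAsiento_spec : Claim_equal_verificarAsiento := by
  intro g n _ hpre
  unfold Spec_verificarAsiento verificarAsiento verificarAsiento_alt
  rw [vaOuter_spec, pyRange10]
  by_cases hrange : 1 ≤ n ∧ n ≤ 100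
  · obtain ⟨h1, h2⟩ := hrange
    obtain ⟨s, hs⟩ := Option.isSome_iff_exists.mp (hpre ⟨h1, h2⟩)
    have hf : PySem.Int.floordiv (n - 1) 10 = (((n - 1).toNat / 10 : Nat) : Int) := by
      rw [PySem.Int.floordiv_eq_ediv_of_pos (by omega)]; omega
    have hm : PySem.Int.mod (n - 1) 10 = (((n - 1).toNat % 10 : Nat) : Int) := by
      rw [PySem.Int.mod_eq_emod_of_pos (by omega)]; omega
    have hub : (n - 1).toNat / 10 < 10 := by omega
    have hget : (([0,1,2,3,4,5,6,7,8,9] : List Int).getD ((n - 1).toNat / 10) 0)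
        = (((n - 1).toNat / 10 : Nat) : Int) := by
      interval_cases h : ((n - 1).toNat / 10) <;> simp
    rw [hf, hm] at hs
    have hcell : vaCell g (([0,1,2,3,4,5,6,7,8,9] : List Int).getD ((n - 1).toNat / 10) 0)
        ((((n - 1).toNat % 10 : Nat)) : Int) = s := by
      unfold vaCell
      rw [hget]
      rw [hs]
      rfl
    rw [if_pos ⟨h1, h2⟩, hf, hm, hs]
    by_cases hx : s = "XXX"
    · rw [dif_pos ⟨by omega,
            by simp only [List.length_cons, List.length_nil]; push_cast; omega,
            by rw [hcell, hx]⟩]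
      simp [hx]
    · rw [dif_neg]
      · simp [hx]
      · intro ⟨_, _, hc⟩
        rw [hcell] at hc
        exact hx hc
  · rw [if_neg hrange, dif_neg]
    · simp
    · simp only [List.length_cons, List.length_nil]
      intro ⟨ha, hb, _⟩
      apply hrange
      constructor <;> push_cast at hb <;> omega
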